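-- pv_equiv track=rewrite | github.com/Nova840/Robot | stuff/validate_input.py | correctTypes
-- ===== SOURCE A (Python) =====
-- def correctTypes(splitLine):
--     try:
--         if splitLine[0] == "MOTOR":
--             int(splitLine[1])
--             int(splitLine[2])
--             int(splitLine[3])
--             for i in range(len(splitLine[4:])):
--                 if i % 2 == 0:
--                     continue
--                 float(splitLine[i + 4])
--         elif splitLine[0] == "SHUTDOWN":
--             for i in range(len(splitLine[1:])):
--                 if i % 2 == 0:
--                     continue
--                 float(splitLine[i + 1])
--         else:
--             int(splitLine[1])
--             float(splitLine[2])
--             float(splitLine[3])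
--             float(splitLine[4])
--             for i in range(len(splitLine[5:])):
--                 if i % 2 == 0:
--                     continue
--                 float(splitLine[i + 5])
--
--         if splitLine[0] == "MOTOR":
--             for i in range(len(splitLine[4:])):
--                 if i % 2 == 1:
--                     continue
--                 if splitLine[i + 4][0:3] == "BTN":
--                     int(splitLine[i + 4][4:])
--         elif splitLine[0] == "SHUTDOWN":
--             for i in range(len(splitLine[1:])):
--                 if i % 2 == 1:
--                     continue
--                 if splitLine[i + 1][0:3] == "BTN":
--                     int(splitLine[i + 1][4:])
--         else:
--             for i in range(len(splitLine[5:])):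
--                 if i % 2 == 1:
--                     continue
--                 if splitLine[i + 5][0:3] == "BTN":
--                     int(splitLine[i + 5][4:])
--         return True
--     except:
--         return False
-- ===== SOURCE B (Python) =====
-- def _is_int(s):
--     try:
--         int(s)
--         return True
--     except ValueError:
--         return False
--
-- def _is_float(s):
--     try:
--         float(s)
--         return True
--     except ValueError:
--         return False
--
-- def _pair_ok(toks):
--     # consume the tail two tokens at a time: even slot may be a BTN_x token, odd slot must be a float
--     while toks:
--         if toks[0][0:3] == "BTN" and not _is_int(toks[0][4:]):
--             return False
--         if len(toks) == 1:
--             return True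
--         if not _is_float(toks[1]):
--             return False
--         toks = toks[2:]
--     return True
--
-- def correctTypes(splitLine):
--     if not splitLine:
--         return False
--     cmd, args = splitLine[0], splitLine[1:]
--     if cmd == "MOTOR":
--         if len(args) < 3 or not (_is_int(args[0]) and _is_int(args[1]) and _is_int(args[2])):
--             return False
--         tail = args[3:]
--     elif cmd == "SHUTDOWN":
--         tail = args
--     else:
--         if len(args) < 4 or not (_is_int(args[0]) and _is_float(args[1]) and _is_float(args[2]) and _is_float(args[3])):
--             return False
--         tail = args[4:]
--     return _pair_ok(tail)
-- ===== Notes on version B (the rewrite author's own statement) =====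
-- stated objective: simpler
-- what changed: A's six index-driven passes (three float loops and three BTN loops, each re-dispatching on splitLine[0] and indexing back into the whole list) are replaced by boolean predicates, a head split that selects and validates the mandatory leading arguments per command, and one helper that consumes the remaining tokens two at a time (BTN check on the even slot, float check on the odd slot) with no index arithmetic.
import Mathlib
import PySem

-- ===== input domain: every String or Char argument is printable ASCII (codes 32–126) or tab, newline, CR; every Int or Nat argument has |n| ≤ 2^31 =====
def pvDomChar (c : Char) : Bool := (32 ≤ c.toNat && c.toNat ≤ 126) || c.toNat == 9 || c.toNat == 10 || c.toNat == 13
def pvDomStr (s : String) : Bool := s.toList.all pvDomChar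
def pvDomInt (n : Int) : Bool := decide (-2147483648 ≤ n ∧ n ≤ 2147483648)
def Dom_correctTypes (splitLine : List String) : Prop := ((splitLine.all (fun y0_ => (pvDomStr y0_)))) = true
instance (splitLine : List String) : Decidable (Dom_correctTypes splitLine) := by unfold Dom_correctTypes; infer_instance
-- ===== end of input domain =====

-- B replaces A's six index-driven passes (three float loops + three BTN loops, each re-dispatching
-- on splitLine[0]) by a head split validating the mandatory leading arguments per command and one
-- recursive helper consuming the remaining tokens two at a time; simpler, same results.

-- == shared model of the builtins int()/float() succeeding (exact on the ASCII domain) ==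
def pyIsDig (c : Char) : Bool := 48 ≤ c.toNat && c.toNat ≤ 57
def pyWs (c : Char) : Bool := c.toNat == 32 || c.toNat == 9 || c.toNat == 10 || c.toNat == 13 || c.toNat == 11 || c.toNat == 12
def pyLowerAscii (c : Char) : Char := if 65 ≤ c.toNat && c.toNat ≤ 90 then Char.ofNat (c.toNat + 32) else c

-- digit-run continuation once a digit has been seen: (digit | '_' digit)*
def pyDigTail : List Char → List Char
  | [] => []
  | [c] => if pyIsDig c then [] else [c]
  | c :: d :: rest =>
    if pyIsDig c then pyDigTail (d :: rest)
    else if c == '_' && pyIsDig d then pyDigTail rest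
    else c :: d :: rest

-- digitpart: (at least one digit seen, remainder)
def pyDigRun (cs : List Char) : Bool × List Char :=
  match cs with
  | c :: rest => if pyIsDig c then (true, pyDigTail rest) else (false, cs)
  | [] => (false, [])

-- hand port (PySem has no float): true iff CPython float(s) succeeds, exact on the ASCII domain
-- (strip whitespace, optional sign, inf/infinity/nan case-insensitively, or digits '.' digits exponent
-- with single underscores between digits); validated against CPython on random ASCII strings.
def pyFloatOk (cs0 : List Char) : Bool :=
  let cs1 := ((cs0.dropWhile pyWs).reverse.dropWhile pyWs).reverse
  let cs2 := match cs1 with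
    | c :: r => if c == '+' || c == '-' then r else cs1
    | [] => []
  let low := cs2.map pyLowerAscii
  if low == ['i','n','f'] || low == ['i','n','f','i','n','i','t','y'] || low == ['n','a','n'] then true
  else
    let p1 := pyDigRun cs2
    let p2 := match p1.2 with
      | '.' :: rest => pyDigRun rest
      | _ => (false, p1.2)
    if !(p1.1 || p2.1) then false
    else match p2.2 with
      | c :: rest =>
        if c == 'e' || c == 'E' then
          let rest2 := match rest with
            | s :: r2 => if s == '+' || s == '-' then r2 else rest
            | [] => []
          let p3 := pyDigRun rest2
          p3.1 && p3.2.isEmpty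
        else false
      | [] => true

-- ===== PORT A =====
-- int(splitLine[i]) succeeds (false also on IndexError)
def ctIntAt (splitLine : List String) (i : Int) : Bool :=
  match PySem.List.pyGet? splitLine i with
  | some s => (PySem.Int.ofStr? s).isSome
  | none => false

-- float(splitLine[i]) succeeds (false also on IndexError)
def ctFloatAt (splitLine : List String) (i : Int) : Bool :=
  match PySem.List.pyGet? splitLine i with
  | some s => pyFloatOk s.toList
  | none => false

-- if splitLine[i][0:3] == "BTN": int(splitLine[i][4:])  succeeds
def ctBtnAt (splitLine : List String) (i : Int) : Bool :=
  match PySem.List.pyGet? splitLine i with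
  | some s =>
    if PySem.List.slice s.toList (some 0) (some 3) == ['B','T','N'] then
      (PySem.Int.ofChars? (PySem.List.slice s.toList (some 4) none)).isSome
    else true
  | none => false

-- for i in range(len(splitLine[off:])): if i % 2 == 0: continue; float(splitLine[i + off])
def ctLoopFloat (splitLine : List String) (off : Int) : Bool :=
  (PySem.List.pyRange 0 ((PySem.List.slice splitLine (some off) none).length : Int) 1).foldl
    (fun ok i => ok && (if PySem.Int.mod i 2 == 0 then true else ctFloatAt splitLine (i + off))) true

-- for i in range(len(splitLine[off:])): if i % 2 == 1: continue; if …[0:3]=="BTN": int(…[4:])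
def ctLoopBtn (splitLine : List String) (off : Int) : Bool :=
  (PySem.List.pyRange 0 ((PySem.List.slice splitLine (some off) none).length : Int) 1).foldl
    (fun ok i => ok && (if PySem.Int.mod i 2 == 1 then true else ctBtnAt splitLine (i + off))) true

def correctTypes (splitLine : List String) : Bool :=
  match PySem.List.pyGet? splitLine 0 with
  | none => false
  | some cmd =>
    (if cmd == "MOTOR" then
        ctIntAt splitLine 1 && ctIntAt splitLine 2 && ctIntAt splitLine 3 && ctLoopFloat splitLine 4
     else if cmd == "SHUTDOWN" then
        ctLoopFloat splitLine 1
     else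
        ctIntAt splitLine 1 && ctFloatAt splitLine 2 && ctFloatAt splitLine 3 &&
          ctFloatAt splitLine 4 && ctLoopFloat splitLine 5)
    &&
    (if cmd == "MOTOR" then ctLoopBtn splitLine 4
     else if cmd == "SHUTDOWN" then ctLoopBtn splitLine 1
     else ctLoopBtn splitLine 5)

-- ===== PORT B =====
-- _is_int(s)
def bIsInt (s : String) : Bool := (PySem.Int.ofStr? s).isSome

-- _is_float(s)
def bIsFloat (s : String) : Bool := pyFloatOk s.toList

-- 'toks[0][0:3] == "BTN" and not _is_int(toks[0][4:])' fails the even slot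
def bBtnOk (t : String) : Bool :=
  !(PySem.List.slice t.toList (some 0) (some 3) == ['B','T','N']
      && !(PySem.Int.ofChars? (PySem.List.slice t.toList (some 4) none)).isSome)

-- _pair_ok: consume the tail two tokens at a time (even slot BTN check, odd slot float check)
def bPairOk : List String → Bool
  | [] => true
  | [t] => bBtnOk t
  | t :: f :: rest => bBtnOk t && bIsFloat f && bPairOk rest

def correctTypes_alt (splitLine : List String) : Bool :=
  match splitLine with
  | [] => false
  | cmd :: args =>
    if cmd == "MOTOR" then
      match args with
      | a :: b :: c :: tail => bIsInt a && bIsInt b && bIsInt c && bPairOk tail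
      | _ => false
    else if cmd == "SHUTDOWN" then bPairOk args
    else
      match args with
      | a :: b :: c :: d :: tail => bIsInt a && bIsFloat b && bIsFloat c && bIsFloat d && bPairOk tail
      | _ => false

-- ===== PRECONDITION & SPEC =====
def Spec_correctTypes (splitLine : List String) (out : Bool) : Prop := out = correctTypes_alt splitLine
instance (splitLine : List String) (out : Bool) : Decidable (Spec_correctTypes splitLine out) := by unfold Spec_correctTypes; infer_instance

-- ===== CLAIM (what is proved, stated in full; the proofs are below) =====
def Claim_equal_correctTypes : Prop := ∀ (splitLine : List String), Dom_correctTypes splitLine → Spec_correctTypes splitLine (correctTypes splitLine)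

-- ===== LEMMAS AND PROOFS =====

-- the per-position condition both tails amount to
def tailAll (ts : List String) : Bool :=
  (List.range ts.length).all
    (fun k => if k % 2 == 1 then bIsFloat (ts.getD k "") else bBtnOk (ts.getD k ""))

theorem all_congr_mem' {α : Type} {l : List α} {f g : α → Bool} (h : ∀ x ∈ l, f x = g x) :
    l.all f = l.all g := by
  induction l with
  | nil => rfl
  | cons x t ih =>
    simp only [List.all_cons, h x (List.mem_cons_self), ih (fun y hy => h y (List.mem_cons_of_mem x hy))]

theorem foldl_and_eq {α : Type} (l : List α) (p : α → Bool) (b : Bool) :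
    l.foldl (fun ok x => ok && p x) b = (b && l.all p) := by
  induction l generalizing b with
  | nil => simp
  | cons x t ih => simp [List.foldl_cons, ih, Bool.and_assoc]

theorem pyRange_all (n : Nat) (f : Int → Bool) :
    (PySem.List.pyRange 0 (n : Int) 1).all f = (List.range n).all (fun k => f (k : Int)) := by
  rw [PySem.List.pyRange_zero_natCast, List.all_map]
  rfl

theorem range_all_and (n : Nat) (f g : Nat → Bool) :
    ((List.range n).all f && (List.range n).all g)
      = (List.range n).all (fun k => f k && g k) := by
  rw [Bool.eq_iff_iff]
  simp only [Bool.and_eq_true, List.all_eq_true]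
  constructor
  · rintro ⟨h1, h2⟩ k hk; exact ⟨h1 k hk, h2 k hk⟩
  · intro h; exact ⟨fun k hk => (h k hk).1, fun k hk => (h k hk).2⟩

-- A's two index loops at offset off together compute tailAll of the dropped tail
theorem loops_eq (xs : List String) (off : Nat) :
    (ctLoopFloat xs (off : Int) && ctLoopBtn xs (off : Int)) = tailAll (xs.drop off) := by
  unfold ctLoopFloat ctLoopBtn tailAll
  rw [foldl_and_eq, foldl_and_eq]
  simp only [Bool.true_and]
  rw [PySem.List.slice_from_natCast]
  set ts := xs.drop off with hts
  rw [pyRange_all, pyRange_all, range_all_and]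
  apply all_congr_mem'
  intro k hk
  have hk' : k < ts.length := List.mem_range.mp hk
  have hget : PySem.List.pyGet? xs ((k : Int) + (off : Int)) = some (ts.getD k "") := by
    rw [show ((k : Int) + (off : Int)) = ((off + k : Nat) : Int) by push_cast; ring,
      PySem.List.pyGet?_natCast, ← List.getElem?_drop, ← hts,
      List.getElem?_eq_getElem hk', List.getD_eq_getElem ts "" hk']
  have hmod : PySem.Int.mod (k : Int) 2 = ((k % 2 : Nat) : Int) := by
    exact_mod_cast PySem.Int.mod_natCast k 2
  unfold ctFloatAt ctBtnAt bIsFloat bBtnOk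
  simp only [hget, hmod]
  rcases Nat.mod_two_eq_zero_or_one k with h | h <;> rw [h] <;> norm_num
  rcases Bool.eq_false_or_eq_true
      (PySem.List.slice ((ts[k]?.getD "")).toList none (some 3) == ['B','T','N']) with hb | hb <;>
    simp_all

-- two-step unfolding of the per-position condition
theorem tailAll_cons2 (t f : String) (rest : List String) :
    tailAll (t :: f :: rest) = (bBtnOk t && bIsFloat f && tailAll rest) := by
  rw [Bool.eq_iff_iff]
  simp only [tailAll, Bool.and_eq_true, List.all_eq_true, List.mem_range, List.length_cons]
  constructor
  · intro h
    have h0 := h 0 (by omega)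
    have h1 := h 1 (by omega)
    simp at h0 h1
    refine ⟨⟨h0, h1⟩, ?_⟩
    intro k hk
    have hk2 := h (k + 2) (by omega)
    have : (k + 2) % 2 = k % 2 := by omega
    simpa [this, List.getD_cons_succ] using hk2
  · rintro ⟨⟨h0, h1⟩, h⟩
    intro k hk
    match k with
    | 0 => simpa using h0
    | 1 => simpa using h1
    | (m + 2) =>
      have := h m (by omega)
      have hm : (m + 2) % 2 = m % 2 := by omega
      simpa [hm, List.getD_cons_succ] using this

-- B's pairwise consumer computes the same per-position condition
theorem bPairOk_eq (ts : List String) : bPairOk ts = tailAll ts := by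
  induction ts using bPairOk.induct with
  | case1 => rfl
  | case2 t => simp [bPairOk, tailAll]
  | case3 t f rest ih =>
    show (bBtnOk t && bIsFloat f && bPairOk rest) = tailAll (t :: f :: rest)
    rw [ih, tailAll_cons2]

set_option maxHeartbeats 1000000 in
theorem correctTypes_spec : Claim_equal_correctTypes := by
  unfold Claim_equal_correctTypes
  intro splitLine _
  unfold Spec_correctTypes
  match splitLine with
  | [] => rfl
  | cmd :: args =>
    rw [show correctTypes (cmd :: args)
        = (match PySem.List.pyGet? (cmd :: args) 0 with
          | none => false
          | some cmd' =>
            (if cmd' == "MOTOR" then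
                ctIntAt (cmd::args) 1 && ctIntAt (cmd::args) 2 && ctIntAt (cmd::args) 3 && ctLoopFloat (cmd::args) 4
             else if cmd' == "SHUTDOWN" then ctLoopFloat (cmd::args) 1
             else ctIntAt (cmd::args) 1 && ctFloatAt (cmd::args) 2 && ctFloatAt (cmd::args) 3 &&
                    ctFloatAt (cmd::args) 4 && ctLoopFloat (cmd::args) 5)
            && (if cmd' == "MOTOR" then ctLoopBtn (cmd::args) 4
                else if cmd' == "SHUTDOWN" then ctLoopBtn (cmd::args) 1
                else ctLoopBtn (cmd::args) 5)) from rfl,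
      PySem.List.pyGet?_zero_cons]
    have h4 := loops_eq (cmd :: args) 4
    have h1 := loops_eq (cmd :: args) 1
    have h5 := loops_eq (cmd :: args) 5
    push_cast at h4 h1 h5
    by_cases hm : cmd == "MOTOR"
    · simp only [correctTypes_alt, hm, if_true]
      match args with
      | [] =>
        simp [ctIntAt, PySem.List.pyGet?_of_nonneg]
      | [a] =>
        simp [ctIntAt, PySem.List.pyGet?_of_nonneg]
      | [a, b] =>
        simp [ctIntAt, PySem.List.pyGet?_of_nonneg]
      | a :: b :: c :: tail =>
        have e1 : ctIntAt (cmd::a::b::c::tail) 1 = bIsInt a := by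
          simp [ctIntAt, bIsInt, PySem.List.pyGet?_of_nonneg]
        have e2 : ctIntAt (cmd::a::b::c::tail) 2 = bIsInt b := by
          simp [ctIntAt, bIsInt, PySem.List.pyGet?_of_nonneg]
        have e3 : ctIntAt (cmd::a::b::c::tail) 3 = bIsInt c := by
          simp [ctIntAt, bIsInt, PySem.List.pyGet?_of_nonneg]
        rw [show ((ctIntAt (cmd::a::b::c::tail) 1 && ctIntAt (cmd::a::b::c::tail) 2 &&
              ctIntAt (cmd::a::b::c::tail) 3 && ctLoopFloat (cmd::a::b::c::tail) 4)
              && ctLoopBtn (cmd::a::b::c::tail) 4)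
            = (ctIntAt (cmd::a::b::c::tail) 1 && ctIntAt (cmd::a::b::c::tail) 2 &&
               ctIntAt (cmd::a::b::c::tail) 3 &&
               (ctLoopFloat (cmd::a::b::c::tail) 4 && ctLoopBtn (cmd::a::b::c::tail) 4))
            by simp [Bool.and_assoc], h4, e1, e2, e3]
        simp [bPairOk_eq]
    · by_cases hs : cmd == "SHUTDOWN"
      · simp only [correctTypes_alt, hm, hs, if_true, Bool.false_eq_true, if_false]
        rw [h1]
        simp [bPairOk_eq]
      · simp only [correctTypes_alt, hm, hs, Bool.false_eq_true, if_false]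
        match args with
        | [] => simp [ctIntAt, PySem.List.pyGet?_of_nonneg]
        | [a] => simp [ctIntAt, ctFloatAt, PySem.List.pyGet?_of_nonneg]
        | [a, b] => simp [ctIntAt, ctFloatAt, PySem.List.pyGet?_of_nonneg]
        | [a, b, c] => simp [ctIntAt, ctFloatAt, PySem.List.pyGet?_of_nonneg]
        | a :: b :: c :: d :: tail =>
          have e1 : ctIntAt (cmd::a::b::c::d::tail) 1 = bIsInt a := by
            simp [ctIntAt, bIsInt, PySem.List.pyGet?_of_nonneg]
          have e2 : ctFloatAt (cmd::a::b::c::d::tail) 2 = bIsFloat b := by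
            simp [ctFloatAt, bIsFloat, PySem.List.pyGet?_of_nonneg]
          have e3 : ctFloatAt (cmd::a::b::c::d::tail) 3 = bIsFloat c := by
            simp [ctFloatAt, bIsFloat, PySem.List.pyGet?_of_nonneg]
          have e4 : ctFloatAt (cmd::a::b::c::d::tail) 4 = bIsFloat d := by
            simp [ctFloatAt, bIsFloat, PySem.List.pyGet?_of_nonneg]
          rw [show (((ctIntAt (cmd::a::b::c::d::tail) 1 && ctFloatAt (cmd::a::b::c::d::tail) 2 &&
                ctFloatAt (cmd::a::b::c::d::tail) 3 && ctFloatAt (cmd::a::b::c::d::tail) 4 &&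
                ctLoopFloat (cmd::a::b::c::d::tail) 5) && ctLoopBtn (cmd::a::b::c::d::tail) 5))
              = (ctIntAt (cmd::a::b::c::d::tail) 1 && ctFloatAt (cmd::a::b::c::d::tail) 2 &&
                 ctFloatAt (cmd::a::b::c::d::tail) 3 && ctFloatAt (cmd::a::b::c::d::tail) 4 &&
                 (ctLoopFloat (cmd::a::b::c::d::tail) 5 && ctLoopBtn (cmd::a::b::c::d::tail) 5))
              by simp [Bool.and_assoc], h5, e1, e2, e3, e4]
          simp [bPairOk_eq]
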